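-- pv_equiv track=rewrite | github.com/sparta-miracle/algorithm_study | yejin/22_12_01_02.py | solution
-- ===== SOURCE A (Python) =====
-- def solution(keyinput, board):
--     r = 0
--     u = 0
-- # 가로측 좌표 r과 세로측 좌표 u를 정한다.
--     for i in keyinput:
--         if i == "left":
--             r -= 1
--         elif i == "right":
--             r += 1
--         elif i == "up":
--             u += 1
--         else:
--             u -= 1
-- # board 값을 통해 좌표의 증가 범위를 제한해준다.
--         if r > board[0]//2:
--             r = board[0]//2
--         elif r < board[0]//2*-1:
--             r = board[0]//2*-1
--         if u > board[1]//2: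
--             u = board[1]//2
--         elif u < board[1]//2*-1:
--             u = board[1]//2*-1
--     return [r, u]
-- ===== SOURCE B (Python) =====
-- def _clamp(v, lim):
--     return lim if v > lim else (-lim if v < -lim else v)
--
-- def solution(keyinput, board):
--     # horizontal pass: only left/right move r, clamped after every key
--     r = 0
--     for k in keyinput:
--         if k == "left":
--             r -= 1
--         elif k == "right":
--             r += 1
--         r = _clamp(r, board[0] // 2)
--     # vertical pass: up increments, any other non-left/right key decrements
--     u = 0
--     for k in keyinput:
--         if k == "up":
--             u += 1
--         elif k not in ("left", "right"):
--             u -= 1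
--         u = _clamp(u, board[1] // 2)
--     return [r, u]
-- ===== Notes on version B (the rewrite author's own statement) =====
-- stated objective: alternative
-- what changed: Replaces A's single loop carrying the (r,u) pair with two sequential single-axis passes over keyinput, each moving and clamping one coordinate independently via a shared clamp helper.
import Mathlib
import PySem

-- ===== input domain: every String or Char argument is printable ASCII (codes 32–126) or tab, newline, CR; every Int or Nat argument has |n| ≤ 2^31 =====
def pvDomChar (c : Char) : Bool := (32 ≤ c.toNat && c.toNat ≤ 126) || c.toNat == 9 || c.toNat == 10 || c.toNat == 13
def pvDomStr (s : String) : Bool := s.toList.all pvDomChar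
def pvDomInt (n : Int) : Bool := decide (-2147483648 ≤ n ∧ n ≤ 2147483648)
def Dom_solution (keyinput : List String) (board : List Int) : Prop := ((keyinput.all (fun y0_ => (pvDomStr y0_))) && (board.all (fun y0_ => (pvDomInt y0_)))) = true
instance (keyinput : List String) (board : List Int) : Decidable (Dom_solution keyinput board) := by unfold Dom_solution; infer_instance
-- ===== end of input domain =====

-- B re-implements A as two sequential single-axis passes (same per-step clamping); equal return value, no speed claim.

-- ===== PORT A =====
-- A's combined loop body: move (r,u) by key i, then clamp r then u to ±board[k]//2 (board read each step).
def pvStepA (board : List Int) (s : Int × Int) (i : String) : Int × Int :=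
  let r := s.1
  let u := s.2
  let (r, u) :=
    if i = "left" then (r - 1, u)
    else if i = "right" then (r + 1, u)
    else if i = "up" then (r, u + 1)
    else (r, u - 1)
  let b0 := PySem.Int.floordiv (PySem.List.pyGetD board 0 0) 2
  let r := if r > b0 then b0 else if r < b0 * (-1) then b0 * (-1) else r
  let b1 := PySem.Int.floordiv (PySem.List.pyGetD board 1 0) 2
  let u := if u > b1 then b1 else if u < b1 * (-1) then b1 * (-1) else u
  (r, u)

def solution (keyinput : List String) (board : List Int) : List Int :=
  let s := keyinput.foldl (pvStepA board) (0, 0)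
  [s.1, s.2]

-- ===== PORT B =====
def pvClamp (v lim : Int) : Int := if v > lim then lim else if v < -lim then -lim else v

def pvStepR (board : List Int) (r : Int) (k : String) : Int :=
  let r := if k = "left" then r - 1 else if k = "right" then r + 1 else r
  pvClamp r (PySem.Int.floordiv (PySem.List.pyGetD board 0 0) 2)

def pvStepU (board : List Int) (u : Int) (k : String) : Int :=
  let u := if k = "up" then u + 1 else if ¬ (k = "left" ∨ k = "right") then u - 1 else u
  pvClamp u (PySem.Int.floordiv (PySem.List.pyGetD board 1 0) 2)

def solution_alt (keyinput : List String) (board : List Int) : List Int :=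
  let r := keyinput.foldl (pvStepR board) 0
  let u := keyinput.foldl (pvStepU board) 0
  [r, u]

-- ===== PRECONDITION & SPEC =====
-- A indexes board[0] and board[1] inside the loop, so it raises IndexError when keyinput is nonempty and board has fewer than 2 elements; those inputs are excluded (B raises there too).
def Pre_solution (keyinput : List String) (board : List Int) : Prop :=
  keyinput = [] ∨ 2 ≤ board.length
instance (keyinput : List String) (board : List Int) : Decidable (Pre_solution keyinput board) := by unfold Pre_solution; infer_instance

def pvWitness_solution : List String × List Int := (["up", "left", "down"], [4, 5])

def Spec_solution (keyinput : List String) (board : List Int) (out : List Int) : Prop := out = solution_alt keyinput board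
instance (keyinput : List String) (board : List Int) (out : List Int) : Decidable (Spec_solution keyinput board out) := by unfold Spec_solution; infer_instance

-- ===== CLAIM (what is proved, stated in full; the proofs are below) =====
def Claim_equal_solution : Prop := ∀ (keyinput : List String) (board : List Int), Dom_solution keyinput board → Pre_solution keyinput board → Spec_solution keyinput board (solution keyinput board)

-- ===== LEMMAS AND PROOFS =====

theorem pvStepA_eq (board : List Int) (s : Int × Int) (i : String) :
    pvStepA board s i = (pvStepR board s.1 i, pvStepU board s.2 i) := by
  unfold pvStepA pvStepR pvStepU pvClamp
  by_cases hl : i = "left" <;> by_cases hr : i = "right" <;> by_cases hu : i = "up" <;>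
    simp [hl, hr, hu]

theorem foldl_split (board : List Int) (l : List String) (r u : Int) :
    l.foldl (pvStepA board) (r, u) = (l.foldl (pvStepR board) r, l.foldl (pvStepU board) u) := by
  induction l generalizing r u with
  | nil => rfl
  | cons k t ih => simp [List.foldl, pvStepA_eq, ih]

-- ===== VERDICT (by name: the statement is the Claim_ definition above) =====
theorem solution_spec : Claim_equal_solution := by
  intro keyinput board _ _
  unfold Spec_solution solution solution_alt
  simp [foldl_split]
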